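-- pv_equiv track=rewrite | github.com/tarsam2009/mathematics | research/affine_sym.py | affine_less_than
-- ===== SOURCE A (Python) =====
-- def all_reduced_words( start, n=3 ):
-- 	unexpanded = [list(start)]
-- 	expanded = list()
--
-- 	while unexpanded:
-- 		seed = unexpanded.pop()
-- 		expanded.append( seed )
--
-- 		for i in range(len(seed)-2):
-- 			neighbors = ((seed[i]+1)%n == seed[i+1]) or ((seed[i+1]+1)%n == seed[i])
--
-- 			if seed[i] == seed[i+2] and neighbors:
-- 				newseed = list( seed )
-- 				newseed[i:i+3] = [seed[i+1], seed[i], seed[i+1]]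
-- 				if newseed not in expanded:
-- 					unexpanded.append(newseed)
--
-- 	return expanded
--
-- def affine_less_than( a, b ):
-- 	if len(a) == 0: return True
-- 	if len(b) == 0: return False
--
-- 	words_of_a = [ ','.join(map(str,x)) for x in all_reduced_words(a)]
--
-- 	for word in all_reduced_words( b ):
-- 		#Check if word contains some word of a
-- 		word = ','.join(map(str,word))
--
-- 		#print 'Checking',[word]
--
-- 		for aword in words_of_a:
-- 			#print '\tAgainst', aword
-- 			if aword in word:
-- 				break
-- 		else: #No word found
-- 			#print 'No {} found in {}'.format( word, words_of_a )
-- 			return False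
--
-- 	return True
-- ===== SOURCE B (Python) =====
-- # B: computes the reduced-word closure as a least fixpoint by repeatedly taking the
-- # move-image of the ENTIRE current set until it stops growing (no worklist, stack,
-- # frontier or per-node visited bookkeeping); containment folded into all/any.
--
-- def _moves(w):
--     out = []
--     for i in range(len(w) - 2):
--         x, y = w[i], w[i + 1]
--         if w[i + 2] == x and ((x + 1) % 3 == y or (y + 1) % 3 == x):
--             out.append(w[:i] + (y, x, y) + w[i + 3:])
--     return out
--
-- def _saturate(start):
--     words = {tuple(start)}
--     while True:
--         new = words | {v for w in words for v in _moves(w)}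
--         if len(new) == len(words):
--             return words
--         words = new
--
-- def _join(w):
--     return ','.join(map(str, w))
--
-- def affine_less_than(a, b):
--     if len(a) == 0:
--         return True
--     if len(b) == 0:
--         return False
--     strs_a = [_join(w) for w in _saturate(a)]
--     return all(any(s in _join(w) for s in strs_a) for w in _saturate(b))
-- ===== Notes on version B (the rewrite author's own statement) =====
-- stated objective: alternative
-- what changed: Replaces A's explicit-stack DFS worklist (which pops seeds one at a time, re-expands duplicate stack entries and checks membership against the growing 'expanded' list) with a whole-set least-fixpoint saturation: each round unions the move-image of the entire current set into it and stops when the set no longer grows, with no worklist, frontier or per-node visited bookkeeping; A's for/else containment loops become an all/any over the two word sets.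
import Mathlib
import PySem

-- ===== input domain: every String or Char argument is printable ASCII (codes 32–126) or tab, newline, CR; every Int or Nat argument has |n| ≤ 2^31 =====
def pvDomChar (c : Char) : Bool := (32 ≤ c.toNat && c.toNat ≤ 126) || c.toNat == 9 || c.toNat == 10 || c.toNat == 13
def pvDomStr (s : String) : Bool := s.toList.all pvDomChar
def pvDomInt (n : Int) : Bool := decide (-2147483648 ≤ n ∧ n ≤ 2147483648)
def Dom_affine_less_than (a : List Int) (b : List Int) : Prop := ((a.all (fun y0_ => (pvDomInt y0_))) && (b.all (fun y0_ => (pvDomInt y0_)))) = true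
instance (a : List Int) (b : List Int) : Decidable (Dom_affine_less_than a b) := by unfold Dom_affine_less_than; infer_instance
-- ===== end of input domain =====

-- B replaces A's explicit-stack DFS worklist by a whole-set least-fixpoint saturation
-- (each round unions the move-image of the entire current set, stopping when it no longer
-- grows) and folds A's for/else containment loops into all/any; alternative, not faster.

-- Termination scaffolding shared by both ports: the finite universe of candidate words
-- (same length as `start`, entries drawn from `start`) and the count of unrecorded words.
def allW (vals : List Int) : Nat → List (List Int)
  | 0 => [[]]
  | n + 1 => vals.flatMap (fun v => (allW vals n).map (fun w => v :: w))

def freshCount (U rec : List (List Int)) : Nat :=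
  (U.filter (fun w => !rec.contains w)).length

theorem mem_allW {vals : List Int} {n : Nat} {w : List Int} :
    w ∈ allW vals n ↔ w.length = n ∧ ∀ x ∈ w, x ∈ vals := by
  induction n generalizing w with
  | zero =>
    simp only [allW, List.mem_cons, List.not_mem_nil, or_false, List.length_eq_zero_iff]
    constructor
    · rintro rfl; simp
    · rintro ⟨rfl, -⟩; rfl
  | succ n ih =>
    cases w with
    | nil => simp [allW]
    | cons a w =>
      simp only [allW, List.mem_flatMap, List.mem_map]
      constructor
      · rintro ⟨v, hv, w', hw', h⟩
        obtain ⟨rfl, rfl⟩ : a = v ∧ w = w' := by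
          exact ⟨(List.cons.injEq ..).mp h.symm |>.1, (List.cons.injEq ..).mp h.symm |>.2⟩
        obtain ⟨h1, h2⟩ := ih.mp hw'
        refine ⟨by simp [h1], ?_⟩
        intro x hx
        rcases List.mem_cons.mp hx with rfl | hx
        · exact hv
        · exact h2 x hx
      · rintro ⟨hlen, hmem⟩
        exact ⟨a, hmem a (by simp), w, ih.mpr ⟨by simpa using hlen, fun x hx => hmem x (by simp [hx])⟩, rfl⟩

theorem freshCount_congr {U rec rec' : List (List Int)}
    (h : ∀ w, w ∈ rec ↔ w ∈ rec') : freshCount U rec = freshCount U rec' := by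
  unfold freshCount
  congr 1
  apply List.filter_congr
  intro w _
  have : rec.contains w = rec'.contains w :=
    Bool.eq_iff_iff.mpr (by simp [List.contains_iff_mem, h w])
  rw [this]

theorem filter_length_le {α : Type} (p q : α → Bool) (l : List α)
    (h : ∀ a ∈ l, q a = true → p a = true) :
    (l.filter q).length ≤ (l.filter p).length := by
  induction l with
  | nil => simp
  | cons a l ih =>
    have ihl := ih (fun b hb => h b (List.mem_cons_of_mem _ hb))
    cases hq : q a with
    | true => simp [List.filter_cons, hq, h a List.mem_cons_self hq, Nat.succ_le_succ ihl]
    | false =>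
      cases hp : p a with
      | true => simp [List.filter_cons, hq, hp]; omega
      | false => simpa [List.filter_cons, hq, hp] using ihl

theorem filter_length_lt {α : Type} (p q : α → Bool) (l : List α)
    (h : ∀ a ∈ l, q a = true → p a = true)
    (x : α) (hx : x ∈ l) (hp : p x = true) (hq : q x = false) :
    (l.filter q).length < (l.filter p).length := by
  induction l with
  | nil => simp at hx
  | cons a l ih =>
    have hle := filter_length_le p q l (fun b hb => h b (List.mem_cons_of_mem _ hb))
    rcases List.mem_cons.mp hx with rfl | hx'
    · simp only [List.filter_cons, hq, hp]
      simpa using Nat.lt_succ_of_le hle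
    · have ihl := ih (fun b hb => h b (List.mem_cons_of_mem _ hb)) hx'
      cases hq' : q a with
      | true =>
        simp [List.filter_cons, hq', h a List.mem_cons_self hq']
        omega
      | false =>
        cases hp' : p a with
        | true => simp [List.filter_cons, hq', hp']; omega
        | false => simpa [List.filter_cons, hq', hp'] using ihl

theorem freshCount_lt {U rec rec' : List (List Int)}
    (hsub : ∀ w, w ∈ rec → w ∈ rec') (x : List Int)
    (hxU : x ∈ U) (hx : x ∉ rec) (hx' : x ∈ rec') :
    freshCount U rec' < freshCount U rec := by
  unfold freshCount
  apply filter_length_lt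
  · intro a _ hq
    simp only [Bool.not_eq_eq_eq_not, Bool.not_true, Bool.not_eq_true',
      ← Bool.not_eq_true, List.contains_iff_mem] at *
    exact fun ha => hq (hsub a ha)
  · exact hxU
  · simpa [List.contains_iff_mem] using hx
  · simpa [List.contains_iff_mem] using hx'

-- ===== PORT A =====
-- all indices seed[i], seed[i+1], seed[i+2] are in range (i < len-2), so List.getD is exact
def condA (seed : List Int) (i : Nat) : Bool :=
  -- neighbors = ((seed[i]+1)%n == seed[i+1]) or ((seed[i+1]+1)%n == seed[i]); n = 3
  let neighbors := (PySem.Int.mod (seed.getD i 0 + 1) 3 == seed.getD (i+1) 0) ||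
                   (PySem.Int.mod (seed.getD (i+1) 0 + 1) 3 == seed.getD i 0)
  (seed.getD i 0 == seed.getD (i+2) 0) && neighbors

-- newseed = seed with newseed[i:i+3] = [seed[i+1], seed[i], seed[i+1]]
def mvA (seed : List Int) (i : Nat) : List Int :=
  seed.take i ++ [seed.getD (i+1) 0, seed.getD i 0, seed.getD (i+1) 0] ++ seed.drop (i+3)

-- the inner 'for i in range(len(seed)-2)' loop; the stack grows at its head (Python appends
-- at the end and pops from the end; we keep the stack reversed, head = top)
def pushLoopA (exp : List (List Int)) (seed : List Int) (ue : List (List Int)) : List (List Int) :=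
  (List.range (seed.length - 2)).foldl
    (fun ue i => if condA seed i && !(exp.contains (mvA seed i)) then mvA seed i :: ue else ue) ue

theorem mem_consIf {α β : Type} (c : β → Bool) (f : β → α) (l : List β) (ue : List α)
    {x : α} (hx : x ∈ l.foldl (fun acc i => if c i then f i :: acc else acc) ue) :
    x ∈ ue ∨ ∃ i ∈ l, c i = true ∧ x = f i := by
  induction l generalizing ue with
  | nil => exact Or.inl hx
  | cons a l ih =>
    simp only [List.foldl_cons] at hx
    rcases ih _ hx with hx' | ⟨i, hi, hc, rfl⟩
    · by_cases hca : c a = true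
      · simp only [hca, if_true, List.mem_cons] at hx'
        rcases hx' with rfl | hx'
        · exact Or.inr ⟨a, List.mem_cons_self, hca, rfl⟩
        · exact Or.inl hx'
      · simp only [Bool.not_eq_true] at hca
        simp only [hca, Bool.false_eq_true, if_false] at hx'
        exact Or.inl hx'
    · exact Or.inr ⟨i, List.mem_cons_of_mem _ hi, hc, rfl⟩

theorem consIf_shape {α β : Type} (c : β → Bool) (f : β → α) (l : List β) (ue : List α) :
    l.foldl (fun acc i => if c i then f i :: acc else acc) ue = ue ∨
      ∃ i ∈ l, c i = true ∧ ∃ t, l.foldl (fun acc i => if c i then f i :: acc else acc) ue = f i :: t := by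
  induction l generalizing ue with
  | nil => exact Or.inl rfl
  | cons a l ih =>
    simp only [List.foldl_cons]
    rcases ih (if c a then f a :: ue else ue) with heq | ⟨i, hi, hc, t, heq⟩
    · rw [heq]
      by_cases hca : c a = true
      · exact Or.inr ⟨a, List.mem_cons_self, hca, ue, by simp [hca]⟩
      · simp only [Bool.not_eq_true] at hca
        simp [hca]
    · exact Or.inr ⟨i, List.mem_cons_of_mem _ hi, hc, t, heq⟩

theorem mem_pushLoopA {exp seed ue x} (hx : x ∈ pushLoopA exp seed ue) :
    x ∈ ue ∨ ∃ i, i < seed.length - 2 ∧ condA seed i = true ∧ exp.contains (mvA seed i) = false ∧ x = mvA seed i := by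
  rcases mem_consIf _ _ _ _ hx with hx' | ⟨i, hi, hc, rfl⟩
  · exact Or.inl hx'
  · rw [Bool.and_eq_true] at hc
    exact Or.inr ⟨i, List.mem_range.mp hi, hc.1, by simpa using hc.2, rfl⟩

theorem pushLoopA_shape (exp seed ue) :
    pushLoopA exp seed ue = ue ∨ ∃ w t, pushLoopA exp seed ue = w :: t ∧ exp.contains w = false := by
  rcases consIf_shape (fun i => condA seed i && !(exp.contains (mvA seed i))) (mvA seed)
      (List.range (seed.length - 2)) ue with heq | ⟨i, _, hc, t, heq⟩
  · exact Or.inl heq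
  · rw [Bool.and_eq_true] at hc
    exact Or.inr ⟨mvA seed i, t, heq, by simpa using hc.2⟩

theorem mvA_mem_allW {vals : List Int} {n : Nat} {seed : List Int} {i : Nat}
    (h : seed ∈ allW vals n) (hi : i < seed.length - 2) : mvA seed i ∈ allW vals n := by
  obtain ⟨hlen, hmem⟩ := mem_allW.mp h
  have h3 : i + 3 ≤ seed.length := by omega
  refine mem_allW.mpr ⟨?_, ?_⟩
  · simp only [mvA, List.length_append, List.length_take, List.length_drop,
      List.length_cons, List.length_nil]
    omega
  · intro x hx
    simp only [mvA, List.mem_append, List.mem_cons, List.not_mem_nil, or_false] at hx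
    have hget : ∀ k, k < seed.length → seed.getD k 0 ∈ seed := fun k hk => by
      rw [List.getD_eq_getElem _ _ hk]; exact List.getElem_mem hk
    rcases hx with (hx | (rfl | rfl | rfl)) | hx
    · exact hmem x (List.mem_of_mem_take hx)
    · exact hmem _ (hget (i+1) (by omega))
    · exact hmem _ (hget i (by omega))
    · exact hmem _ (hget (i+1) (by omega))
    · exact hmem x (List.mem_of_mem_drop hx)

-- the 'while unexpanded' loop; the membership hypothesis h ties the stack to the finite
-- universe U and is used only for termination
def loopA (U ue exp : List (List Int))
    (hcl : ∀ w ∈ U, ∀ i, i < w.length - 2 → mvA w i ∈ U)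
    (h : ∀ w ∈ ue, w ∈ U) : List (List Int) :=
  match ue with
  | [] => exp
  | seed :: rest =>
      loopA U (pushLoopA (exp ++ [seed]) seed rest) (exp ++ [seed]) hcl
        (by
          intro w hw
          rcases mem_pushLoopA hw with hw' | ⟨i, hi, _, _, rfl⟩
          · exact h w (List.mem_cons_of_mem _ hw')
          · exact hcl seed (h seed List.mem_cons_self) i hi)
  termination_by (freshCount U exp, (if exp.contains (ue.headD []) then 1 else 0), ue.length)
  decreasing_by
    by_cases hs : seed ∈ exp
    · have hF : freshCount U (exp ++ [seed]) = freshCount U exp :=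
        freshCount_congr (fun w => by
          rw [List.mem_append, List.mem_singleton]
          exact ⟨fun hw => hw.elim id (fun e => e ▸ hs), Or.inl⟩)
      rw [hF]
      apply Prod.Lex.right
      have hsc : exp.contains ((seed :: rest).headD []) = true := by
        simpa [List.contains_iff_mem] using hs
      rw [hsc, if_pos rfl]
      rcases pushLoopA_shape (exp ++ [seed]) seed rest with heq | ⟨w, t, heq, hw⟩
      · simp only [heq]
        by_cases ht : (exp ++ [seed]).contains (rest.headD []) = true
        · rw [ht, if_pos rfl]
          exact Prod.Lex.right _ (by simp)
        · rw [Bool.not_eq_true] at ht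
          rw [ht]
          exact Prod.Lex.left _ _ (by simp)
      · simp only [heq, List.headD_cons, hw]
        exact Prod.Lex.left _ _ (by simp)
    · exact Prod.Lex.left _ _
        (freshCount_lt (fun w hw => List.mem_append_left _ hw) seed
          (h seed List.mem_cons_self) hs (List.mem_append_right _ (List.mem_singleton.mpr rfl)))

def all_reduced_wordsA (start : List Int) : List (List Int) :=
  loopA (allW start start.length) [start] []
    (fun w hw i hi => mvA_mem_allW hw hi)
    (fun w hw => by
      rcases List.mem_singleton.mp hw with rfl
      exact mem_allW.mpr ⟨rfl, fun x hx => hx⟩)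

def joinWordA (w : List Int) : String := PySem.Str.join "," (w.map PySem.Int.toStr)

-- 'for aword in words_of_a: if aword in word: break / else: return False'
def innerA (awords : List String) (wstr : String) : Bool :=
  match awords with
  | [] => false
  | s :: rest => if PySem.Str.isIn s wstr then true else innerA rest wstr

-- 'for word in all_reduced_words(b): … return False / return True'
def checkA (wordsOfA : List String) (ws : List (List Int)) : Bool :=
  match ws with
  | [] => true
  | w :: rest => if innerA wordsOfA (joinWordA w) then checkA wordsOfA rest else false

def affine_less_than (a : List Int) (b : List Int) : Bool :=
  if a.length == 0 then true
  else if b.length == 0 then false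
  else
    let words_of_a := (all_reduced_wordsA a).map joinWordA
    checkA words_of_a (all_reduced_wordsA b)

-- ===== PORT B =====
def condB (w : List Int) (i : Nat) : Bool :=
  (w.getD (i+2) 0 == w.getD i 0) &&
    ((PySem.Int.mod (w.getD i 0 + 1) 3 == w.getD (i+1) 0) ||
     (PySem.Int.mod (w.getD (i+1) 0 + 1) 3 == w.getD i 0))

def mvB (w : List Int) (i : Nat) : List Int :=
  w.take i ++ [w.getD (i+1) 0, w.getD i 0, w.getD (i+1) 0] ++ w.drop (i+3)

def movesB (w : List Int) : List (List Int) :=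
  (List.range (w.length - 2)).foldl
    (fun out i => if condB w i then out ++ [mvB w i] else out) []

theorem movesB_eq (w : List Int) :
    movesB w = ((List.range (w.length - 2)).filter (condB w)).map (mvB w) := by
  unfold movesB
  rw [PySem.List.foldl_append_if (condB w) (mvB w)]
  simp

theorem mem_movesB {w v : List Int} :
    v ∈ movesB w ↔ ∃ i, i < w.length - 2 ∧ condB w i = true ∧ v = mvB w i := by
  rw [movesB_eq]
  simp only [List.mem_map, List.mem_filter, List.mem_range]
  constructor
  · rintro ⟨i, ⟨hi, hc⟩, rfl⟩
    exact ⟨i, hi, hc, rfl⟩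
  · rintro ⟨i, hi, hc, rfl⟩
    exact ⟨i, ⟨hi, hc⟩, rfl⟩

-- one saturation round: new = words | {v for w in words for v in _moves(w)}
-- (set union as the standard dedup-append fold over PySem.Set)
def imageStep (words : List (List Int)) : List (List Int) :=
  words.foldl (fun acc w => (movesB w).foldl (fun acc2 v => PySem.Set.add acc2 v) acc) words

-- the inner Set.add fold, characterised in one shot
theorem addFold_spec (vs acc : List (List Int)) :
    ∃ t, vs.foldl (fun acc2 v => PySem.Set.add acc2 v) acc = acc ++ t ∧
      (∀ v ∈ t, v ∈ vs ∧ v ∉ acc) ∧ (∀ v ∈ vs, v ∈ acc ++ t) := by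
  induction vs generalizing acc with
  | nil => exact ⟨[], by simp⟩
  | cons v vs ih =>
    simp only [List.foldl_cons]
    by_cases hv : v ∈ acc
    · have hadd : PySem.Set.add acc v = acc := by simp [PySem.Set.add, PySem.Set.contains, hv]
      rw [hadd]
      obtain ⟨t, heq, ht, hall⟩ := ih acc
      refine ⟨t, heq, fun u hu => ⟨List.mem_cons_of_mem _ (ht u hu).1, (ht u hu).2⟩, ?_⟩
      intro u hu
      rcases List.mem_cons.mp hu with rfl | hu'
      · exact List.mem_append_left _ hv
      · exact hall u hu'
    · have hadd : PySem.Set.add acc v = acc ++ [v] := by simp [PySem.Set.add, PySem.Set.contains, hv]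
      rw [hadd]
      obtain ⟨t, heq, ht, hall⟩ := ih (acc ++ [v])
      refine ⟨v :: t, by rw [heq]; simp, ?_, ?_⟩
      · intro u hu
        rcases List.mem_cons.mp hu with rfl | hu'
        · exact ⟨List.mem_cons_self, hv⟩
        · have := ht u hu'
          refine ⟨List.mem_cons_of_mem _ this.1, fun hm => this.2 (List.mem_append_left _ hm)⟩
      · intro u hu
        rcases List.mem_cons.mp hu with rfl | hu'
        · simp
        · have := hall u hu'
          simpa [List.mem_append, List.mem_cons, or_assoc] using this

theorem imageStep_spec (words : List (List Int)) :
    ∃ t, imageStep words = words ++ t ∧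
      (∀ v ∈ t, v ∉ words ∧ ∃ w ∈ words, v ∈ movesB w) ∧
      (∀ w ∈ words, ∀ v ∈ movesB w, v ∈ words ++ t) := by
  unfold imageStep
  suffices h : ∀ (fr acc : List (List Int)),
      ∃ t, fr.foldl (fun acc w => (movesB w).foldl (fun acc2 v => PySem.Set.add acc2 v) acc) acc
          = acc ++ t ∧
        (∀ v ∈ t, v ∉ acc ∧ ∃ w ∈ fr, v ∈ movesB w) ∧
        (∀ w ∈ fr, ∀ v ∈ movesB w, v ∈ acc ++ t) by
    exact h words words
  intro fr
  induction fr with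
  | nil => exact fun acc => ⟨[], by simp⟩
  | cons w fr ih =>
    intro acc
    simp only [List.foldl_cons]
    obtain ⟨t₁, heq₁, ht₁, hall₁⟩ := addFold_spec (movesB w) acc
    obtain ⟨t₂, heq₂, ht₂, hall₂⟩ := ih (acc ++ t₁)
    rw [heq₁, heq₂]
    refine ⟨t₁ ++ t₂, by simp, ?_, ?_⟩
    · intro v hv
      rcases List.mem_append.mp hv with hv' | hv'
      · exact ⟨(ht₁ v hv').2, w, List.mem_cons_self, (ht₁ v hv').1⟩
      · have := ht₂ v hv'
        refine ⟨fun hm => this.1 (List.mem_append_left _ hm), ?_⟩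
        obtain ⟨u, hu, hmv⟩ := this.2
        exact ⟨u, List.mem_cons_of_mem _ hu, hmv⟩
    · intro u hu v hv
      rcases List.mem_cons.mp hu with rfl | hu'
      · rcases List.mem_append.mp (hall₁ v hv) with h' | h'
        · exact List.mem_append_left _ h'
        · exact List.mem_append_right _ (List.mem_append_left _ h')
      · have := hall₂ u hu' v hv
        simpa [List.mem_append, or_assoc] using this

theorem movesB_mem_allW {vals : List Int} {n : Nat} {w v : List Int}
    (hw : w ∈ allW vals n) (hv : v ∈ movesB w) : v ∈ allW vals n := by
  obtain ⟨i, hi, -, rfl⟩ := mem_movesB.mp hv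
  exact mvA_mem_allW hw hi

-- 'while True: new = …; if len(new) == len(words): return words; words = new'
def satLoop (U words : List (List Int))
    (hcl : ∀ w ∈ U, ∀ v ∈ movesB w, v ∈ U)
    (h : ∀ w ∈ words, w ∈ U) : List (List Int) :=
  if (imageStep words).length == words.length then words
  else
    satLoop U (imageStep words) hcl
      (by
        intro w hw
        obtain ⟨t, heq, ht, -⟩ := imageStep_spec words
        rw [heq] at hw
        rcases List.mem_append.mp hw with hw' | hw'
        · exact h w hw'
        · obtain ⟨-, u, hu, hmv⟩ := ht w hw'
          exact hcl u (h u hu) w hmv)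
  termination_by freshCount U words
  decreasing_by
    rename_i hne
    obtain ⟨t, heq, ht, -⟩ := imageStep_spec words
    rcases hshape : t with _ | ⟨x, t'⟩
    · exfalso
      apply hne
      rw [heq, hshape]
      simp
    · have hx : x ∈ t := by rw [hshape]; simp
      obtain ⟨hxw, u, hu, hmv⟩ := ht x hx
      refine freshCount_lt ?_ x ?_ hxw ?_
      · intro w hw
        rw [heq]; exact List.mem_append_left _ hw
      · exact hcl u (h u hu) x hmv
      · rw [heq]; exact List.mem_append_right _ hx

def reduced_wordsB (start : List Int) : List (List Int) :=
  satLoop (allW start start.length) (PySem.Set.ofList [start])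
    (fun w hw v hv => movesB_mem_allW hw hv)
    (fun w hw => by
      rcases List.mem_singleton.mp (by simpa [PySem.Set.ofList] using hw) with rfl
      exact mem_allW.mpr ⟨rfl, fun x hx => hx⟩)

def joinWordB (w : List Int) : String := PySem.Str.join "," (w.map PySem.Int.toStr)

def affine_less_than_alt (a : List Int) (b : List Int) : Bool :=
  if a.length == 0 then true
  else if b.length == 0 then false
  else
    let strs_a := (reduced_wordsB a).map joinWordB
    (reduced_wordsB b).all (fun w => strs_a.any (fun s => PySem.Str.isIn s (joinWordB w)))

-- ===== PRECONDITION & SPEC =====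
def Spec_affine_less_than (a : List Int) (b : List Int) (out : Bool) : Prop := out = affine_less_than_alt a b
instance (a : List Int) (b : List Int) (out : Bool) : Decidable (Spec_affine_less_than a b out) := by unfold Spec_affine_less_than; infer_instance

-- ===== CLAIM (what is proved, stated in full; the proofs are below) =====
def Claim_equal_affine_less_than : Prop := ∀ (a : List Int) (b : List Int), Dom_affine_less_than a b → Spec_affine_less_than a b (affine_less_than a b)

-- ===== LEMMAS AND PROOFS =====

theorem subset_consIf {α β : Type} (c : β → Bool) (f : β → α) (l : List β) (ue : List α)
    {x : α} (hx : x ∈ ue) :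
    x ∈ l.foldl (fun acc i => if c i then f i :: acc else acc) ue := by
  induction l generalizing ue with
  | nil => exact hx
  | cons a l ih =>
    simp only [List.foldl_cons]
    apply ih
    split <;> simp [hx]

theorem consIf_of_mem {α β : Type} (c : β → Bool) (f : β → α) (l : List β) (ue : List α)
    {i : β} (hi : i ∈ l) (hc : c i = true) :
    f i ∈ l.foldl (fun acc j => if c j then f j :: acc else acc) ue := by
  induction l generalizing ue with
  | nil => simp at hi
  | cons a l ih =>
    simp only [List.foldl_cons]
    rcases List.mem_cons.mp hi with rfl | hi'
    · exact subset_consIf _ _ _ _ (by simp [hc])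
    · exact ih (if c a then f a :: ue else ue) hi'

theorem subset_pushLoopA {exp seed ue x} (hx : x ∈ ue) : x ∈ pushLoopA exp seed ue :=
  subset_consIf _ _ _ _ hx

theorem pushLoopA_of_mem {exp seed ue} {i : Nat} (hi : i < seed.length - 2)
    (hc : condA seed i = true) (hf : exp.contains (mvA seed i) = false) :
    mvA seed i ∈ pushLoopA exp seed ue :=
  consIf_of_mem _ _ _ _ (List.mem_range.mpr hi)
    (by simp only [hc, Bool.true_and, Bool.not_eq_eq_eq_not, Bool.not_false, hf])

theorem beq_comm_int (x y : Int) : (x == y) = (y == x) := by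
  by_cases h : x = y <;> simp [h, eq_comm]

theorem condA_eq_condB (w : List Int) (i : Nat) : condA w i = condB w i := by
  unfold condA condB
  rw [beq_comm_int (w.getD i 0) (w.getD (i+2) 0)]

theorem mvA_eq_mvB (w : List Int) (i : Nat) : mvA w i = mvB w i := rfl

-- the words A pushes are exactly the fresh movesB-neighbours of the popped seed
theorem mem_pushLoopA_moves {exp seed ue x} (hx : x ∈ pushLoopA exp seed ue) :
    x ∈ ue ∨ x ∈ movesB seed := by
  rcases mem_pushLoopA hx with h | ⟨i, hi, hc, -, rfl⟩
  · exact Or.inl h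
  · exact Or.inr (mem_movesB.mpr ⟨i, hi, (condA_eq_condB seed i) ▸ hc, (mvA_eq_mvB seed i).symm⟩)

theorem pushLoopA_complete {exp seed ue v} (hv : v ∈ movesB seed) (hfresh : v ∉ exp) :
    v ∈ pushLoopA exp seed ue := by
  obtain ⟨i, hi, hc, rfl⟩ := mem_movesB.mp hv
  exact pushLoopA_of_mem hi ((condA_eq_condB seed i).symm ▸ hc)
    (by simpa [List.contains_iff_mem] using hfresh)

-- reachability under braid moves: the specification both enumerations satisfy
inductive ReachR (s : List Int) : List Int → Prop
  | refl : ReachR s s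
  | step {w v : List Int} : ReachR s w → v ∈ movesB w → ReachR s v

theorem loopA_grow {U ue exp hcl h} {x : List Int} (hx : x ∈ exp ∨ x ∈ ue) :
    x ∈ loopA U ue exp hcl h := by
  fun_induction loopA U ue exp hcl h with
  | case1 => exact hx.elim id (by simp)
  | case2 exp seed rest h _h ih =>
    apply ih
    rcases hx with hx | hx
    · exact Or.inl (List.mem_append_left _ hx)
    · rcases List.mem_cons.mp hx with rfl | hx'
      · exact Or.inl (List.mem_append_right _ (by simp))
      · exact Or.inr (subset_pushLoopA hx')

theorem loopA_sound {U ue exp hcl h} (P : List Int → Prop)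
    (hP : ∀ w v, P w → v ∈ movesB w → P v)
    (hexp : ∀ x ∈ exp, P x) (hue : ∀ x ∈ ue, P x) :
    ∀ x ∈ loopA U ue exp hcl h, P x := by
  fun_induction loopA U ue exp hcl h with
  | case1 => exact hexp
  | case2 exp seed rest h _h ih =>
    apply ih
    · intro x hx
      rcases List.mem_append.mp hx with hx' | hx'
      · exact hexp x hx'
      · rcases List.mem_singleton.mp hx' with rfl
        exact hue x List.mem_cons_self
    · intro x hx
      rcases mem_pushLoopA_moves hx with hx' | hx'
      · exact hue x (List.mem_cons_of_mem _ hx')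
      · exact hP seed x (hue seed List.mem_cons_self) hx'

theorem loopA_closed {U ue exp hcl h}
    (hcl' : ∀ w ∈ exp, ∀ v ∈ movesB w, v ∈ exp ∨ v ∈ ue) :
    ∀ w ∈ loopA U ue exp hcl h, ∀ v ∈ movesB w, v ∈ loopA U ue exp hcl h := by
  fun_induction loopA U ue exp hcl h with
  | case1 exp => intro w hw v hv; exact (hcl' w hw v hv).elim id (by simp)
  | case2 exp seed rest h _h ih =>
    apply ih
    intro w hw v hv
    rcases List.mem_append.mp hw with hw' | hw'
    · rcases hcl' w hw' v hv with hv' | hv'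
      · exact Or.inl (List.mem_append_left _ hv')
      · rcases List.mem_cons.mp hv' with rfl | hv''
        · exact Or.inl (List.mem_append_right _ (by simp))
        · exact Or.inr (subset_pushLoopA hv'')
    · rcases List.mem_singleton.mp hw' with rfl
      by_cases hf : v ∈ exp ++ [w]
      · exact Or.inl hf
      · exact Or.inr (pushLoopA_complete hv hf)

theorem mem_all_reduced_wordsA {s x : List Int} :
    x ∈ all_reduced_wordsA s ↔ ReachR s x := by
  constructor
  · intro hx
    refine loopA_sound (ReachR s) (fun w v hw hv => ReachR.step hw hv) (by simp) ?_ x hx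
    intro y hy
    rcases List.mem_singleton.mp hy with rfl
    exact ReachR.refl
  · intro hx
    induction hx with
    | refl => exact loopA_grow (Or.inr (by simp))
    | step hw hv ih =>
      exact loopA_closed (fun w hw => by simp at hw) _ ih _ hv

theorem satLoop_grow {U words hcl h} {x : List Int} (hx : x ∈ words) :
    x ∈ satLoop U words hcl h := by
  fun_induction satLoop U words hcl h with
  | case1 => exact hx
  | case2 words hne h ih =>
    apply ih
    obtain ⟨t, heq, -, -⟩ := imageStep_spec words
    rw [heq]
    exact List.mem_append_left _ hx

theorem satLoop_sound {U words hcl h} (P : List Int → Prop)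
    (hP : ∀ w v, P w → v ∈ movesB w → P v)
    (hwords : ∀ x ∈ words, P x) :
    ∀ x ∈ satLoop U words hcl h, P x := by
  fun_induction satLoop U words hcl h with
  | case1 => exact hwords
  | case2 words hne h ih =>
    apply ih
    intro x hx
    obtain ⟨t, heq, ht, -⟩ := imageStep_spec words
    rw [heq] at hx
    rcases List.mem_append.mp hx with hx' | hx'
    · exact hwords x hx'
    · obtain ⟨-, w, hw, hv⟩ := ht x hx'
      exact hP w x (hwords w hw) hv

theorem satLoop_closed {U words hcl h} :
    ∀ w ∈ satLoop U words hcl h, ∀ v ∈ movesB w, v ∈ satLoop U words hcl h := by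
  fun_induction satLoop U words hcl h with
  | case1 words h hlen =>
    obtain ⟨t, heq, -, hall⟩ := imageStep_spec words
    have hteq : t = [] := by
      have hl := congrArg List.length heq
      rw [List.length_append] at hl
      have : (imageStep words).length = words.length := by
        simpa using hlen
      rw [this] at hl
      have : t.length = 0 := by omega
      exact List.length_eq_zero_iff.mp this
    intro w hw v hv
    have := hall w hw v hv
    rw [hteq, List.append_nil] at this
    exact this
  | case2 words hne h ih => exact ih

theorem mem_reduced_wordsB {s x : List Int} :
    x ∈ reduced_wordsB s ↔ ReachR s x := by
  constructor
  · intro hx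
    refine satLoop_sound (ReachR s) (fun w v hw hv => ReachR.step hw hv) ?_ x hx
    intro y hy
    rcases List.mem_singleton.mp (by simpa [PySem.Set.ofList] using hy) with rfl
    exact ReachR.refl
  · intro hx
    induction hx with
    | refl => exact satLoop_grow (by simp [PySem.Set.ofList])
    | step hw hv ih => exact satLoop_closed _ ih _ hv

theorem mem_A_iff_B {s x : List Int} :
    x ∈ all_reduced_wordsA s ↔ x ∈ reduced_wordsB s := by
  rw [mem_all_reduced_wordsA, mem_reduced_wordsB]

theorem innerA_eq_any (aw : List String) (wstr : String) :
    innerA aw wstr = aw.any (fun s => PySem.Str.isIn s wstr) := by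
  induction aw with
  | nil => rfl
  | cons s rest ih =>
    unfold innerA
    rw [List.any_cons, ih]
    cases hb : PySem.Str.isIn s wstr <;> simp [hb]

theorem checkA_eq_all (woA : List String) (ws : List (List Int)) :
    checkA woA ws = ws.all (fun w => innerA woA (joinWordA w)) := by
  induction ws with
  | nil => rfl
  | cons w rest ih =>
    unfold checkA
    rw [List.all_cons, ih]
    cases hb : innerA woA (joinWordA w) <;> simp [hb]

theorem any_congr_mem {α : Type} (l₁ l₂ : List α) (p : α → Bool)
    (h : ∀ x, x ∈ l₁ ↔ x ∈ l₂) : l₁.any p = l₂.any p := by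
  apply Bool.eq_iff_iff.mpr
  simp only [List.any_eq_true]
  constructor
  · rintro ⟨x, hx, hp⟩; exact ⟨x, (h x).mp hx, hp⟩
  · rintro ⟨x, hx, hp⟩; exact ⟨x, (h x).mpr hx, hp⟩

theorem all_congr_mem {α : Type} (l₁ l₂ : List α) (p : α → Bool)
    (h : ∀ x, x ∈ l₁ ↔ x ∈ l₂) : l₁.all p = l₂.all p := by
  apply Bool.eq_iff_iff.mpr
  simp only [List.all_eq_true]
  constructor
  · intro hp x hx; exact hp x ((h x).mpr hx)
  · intro hp x hx; exact hp x ((h x).mp hx)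

-- ===== VERDICT (by name: the statement is the Claim_ definition above) =====
theorem affine_less_than_spec : Claim_equal_affine_less_than := by
  intro a b _
  unfold Spec_affine_less_than affine_less_than affine_less_than_alt
  by_cases ha : a.length == 0
  · simp [ha]
  · rw [Bool.not_eq_true] at ha
    by_cases hb : b.length == 0
    · simp [ha, hb]
    · rw [Bool.not_eq_true] at hb
      simp only [ha, hb, Bool.false_eq_true, if_false]
      rw [checkA_eq_all]
      rw [all_congr_mem (all_reduced_wordsA b) (reduced_wordsB b) _ (fun x => mem_A_iff_B)]
      congr 1
      funext w
      rw [innerA_eq_any]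
      apply any_congr_mem
      intro x
      simp only [List.mem_map]
      constructor
      · rintro ⟨y, hy, rfl⟩
        exact ⟨y, mem_A_iff_B.mp hy, rfl⟩
      · rintro ⟨y, hy, rfl⟩
        exact ⟨y, mem_A_iff_B.mpr hy, rfl⟩
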